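-- pv_equiv track=rewrite | github.com/yulab2021/IDMP | mode1.py | transcript_location_to_chr_location
-- ===== SOURCE A (Python) =====
-- def transcript_location_to_chr_location(transcript_location, strand, cds_list):
--     summation = 0
--     for cds in cds_list:
--         start = cds[0]
--         end = cds[1]
--         if transcript_location > summation + end - start + 1:
--             summation = summation + end - start + 1
--         else:
--             if strand == "+":
--                 chr_location = transcript_location - summation + start - 1
--             else:
--                 chr_location = end - (transcript_location - summation) + 1
--             return chr_location
-- ===== SOURCE B (Python) =====
-- def transcript_location_to_chr_location(transcript_location, strand, cds_list):
--     # Build the table of cumulative CDS lengths, then search it.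
--     cum = []
--     total = 0
--     for start, end in cds_list:
--         total += end - start + 1
--         cum.append(total)
--     i = next((k for k, c in enumerate(cum) if transcript_location <= c), None)
--     if i is None:
--         return None
--     prev = cum[i - 1] if i > 0 else 0
--     start, end = cds_list[i]
--     if strand == "+":
--         return transcript_location - prev + start - 1
--     return end - (transcript_location - prev) + 1
-- ===== Notes on version B (the rewrite author's own statement) =====
-- stated objective: alternative
-- what changed: A interleaves accumulation and testing in one scan carrying a running offset; B first builds a prefix-sum table of cumulative CDS lengths, then locates the first entry >= transcript_location and computes the coordinate from the table by index.
import Mathlib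
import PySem

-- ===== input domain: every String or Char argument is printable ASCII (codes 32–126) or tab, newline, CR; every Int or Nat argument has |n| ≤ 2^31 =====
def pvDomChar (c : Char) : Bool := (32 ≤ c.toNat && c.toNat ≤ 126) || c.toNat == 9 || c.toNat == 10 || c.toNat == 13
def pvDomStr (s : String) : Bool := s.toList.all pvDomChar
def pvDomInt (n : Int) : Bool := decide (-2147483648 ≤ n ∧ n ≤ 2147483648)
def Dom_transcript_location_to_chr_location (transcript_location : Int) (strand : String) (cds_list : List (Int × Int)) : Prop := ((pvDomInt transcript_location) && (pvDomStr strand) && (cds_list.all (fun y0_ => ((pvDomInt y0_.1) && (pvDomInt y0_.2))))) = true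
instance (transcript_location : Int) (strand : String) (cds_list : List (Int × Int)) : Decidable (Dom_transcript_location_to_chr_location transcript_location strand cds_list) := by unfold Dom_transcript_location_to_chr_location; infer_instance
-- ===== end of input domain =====

-- ===== PORT A =====
-- B builds a prefix-sum table then searches it, instead of A's interleaved scan; equal return values proved on all inputs.
def pvGoA (transcript_location : Int) (strand : String) : List (Int × Int) → Int → Option Int
  | [], _ => none
  | cds :: rest, summation =>
    let start := cds.1
    let «end» := cds.2
    if transcript_location > summation + «end» - start + 1 then
      pvGoA transcript_location strand rest (summation + «end» - start + 1)
    else if strand == "+" then some (transcript_location - summation + start - 1)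
    else some («end» - (transcript_location - summation) + 1)

def transcript_location_to_chr_location (transcript_location : Int) (strand : String) (cds_list : List (Int × Int)) : Option Int :=
  pvGoA transcript_location strand cds_list 0

-- ===== PORT B =====
-- cumulative lengths table (the Python for-loop appending running totals)
def pvCum : List (Int × Int) → Int → List Int
  | [], _ => []
  | (s, e) :: rest, total => (total + e - s + 1) :: pvCum rest (total + e - s + 1)

def transcript_location_to_chr_location_alt (transcript_location : Int) (strand : String) (cds_list : List (Int × Int)) : Option Int :=
  let cum := pvCum cds_list 0
  match cum.findIdx? (fun c => transcript_location ≤ c) with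
  | none => none
  | some i =>
    let prev := if i > 0 then cum.getD (i - 1) 0 else 0
    let cds := cds_list.getD i (0, 0)  -- i < cds_list.length always, so getD is exact
    if strand == "+" then some (transcript_location - prev + cds.1 - 1)
    else some (cds.2 - (transcript_location - prev) + 1)

-- ===== PRECONDITION & SPEC =====
def Spec_transcript_location_to_chr_location (transcript_location : Int) (strand : String) (cds_list : List (Int × Int)) (out : Option Int) : Prop := out = transcript_location_to_chr_location_alt transcript_location strand cds_list
instance (transcript_location : Int) (strand : String) (cds_list : List (Int × Int)) (out : Option Int) : Decidable (Spec_transcript_location_to_chr_location transcript_location strand cds_list out) := by unfold Spec_transcript_location_to_chr_location; infer_instance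

-- ===== CLAIM (what is proved, stated in full; the proofs are below) =====
def Claim_equal_transcript_location_to_chr_location : Prop := ∀ (transcript_location : Int) (strand : String) (cds_list : List (Int × Int)), Dom_transcript_location_to_chr_location transcript_location strand cds_list → Spec_transcript_location_to_chr_location transcript_location strand cds_list (transcript_location_to_chr_location transcript_location strand cds_list)

-- ===== LEMMAS AND PROOFS =====

-- generalized form of B's search: prev at index 0 is the carried accumulator t
def pvInterp (tl : Int) (strand : String) (cds : List (Int × Int)) (t : Int) : Option Int :=
  let cum := pvCum cds t
  match cum.findIdx? (fun c => tl ≤ c) with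
  | none => none
  | some i =>
    let prev := if i = 0 then t else cum.getD (i - 1) 0
    let c := cds.getD i (0, 0)
    if strand == "+" then some (tl - prev + c.1 - 1)
    else some (c.2 - (tl - prev) + 1)

theorem pvGoA_eq_interp (tl : Int) (strand : String) (cds : List (Int × Int)) :
    ∀ t : Int, pvGoA tl strand cds t = pvInterp tl strand cds t := by
  induction cds with
  | nil => intro t; rfl
  | cons hd rest ih =>
    intro t
    obtain ⟨s, e⟩ := hd
    simp only [pvGoA, pvInterp, pvCum, List.findIdx?_cons]
    by_cases h : tl > t + e - s + 1
    · have hnot : ¬ tl ≤ t + e - s + 1 := by omega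
      simp only [h, if_true, hnot, decide_false, Bool.false_eq_true, if_false]
      rw [ih (t + e - s + 1)]
      simp only [pvInterp]
      cases hfi : (pvCum rest (t + e - s + 1)).findIdx? (fun c => tl ≤ c) with
      | none => simp
      | some i =>
        simp only [Option.map_some]
        have : i + 1 ≠ 0 := by omega
        cases i with
        | zero => simp
        | succ j => simp [List.getD]
    · have hle : tl ≤ t + e - s + 1 := by omega
      simp [h, hle, List.getD]

theorem alt_eq_interp (tl : Int) (strand : String) (cds : List (Int × Int)) :
    transcript_location_to_chr_location_alt tl strand cds = pvInterp tl strand cds 0 := by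
  simp only [transcript_location_to_chr_location_alt, pvInterp]
  cases hfi : (pvCum cds 0).findIdx? (fun c => tl ≤ c) with
  | none => rfl
  | some i =>
    cases i with
    | zero => simp
    | succ j => simp

-- ===== VERDICT (by name: the statement is the Claim_ definition above) =====
theorem transcript_location_to_chr_location_spec : Claim_equal_transcript_location_to_chr_location := by
  intro tl strand cds _
  show transcript_location_to_chr_location tl strand cds = transcript_location_to_chr_location_alt tl strand cds
  rw [transcript_location_to_chr_location, pvGoA_eq_interp, alt_eq_interp]
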